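-- pv_equiv track=rewrite | github.com/mkmk749278/360-v2 | src/runtime_truth_report.py | count_log_markers
-- ===== SOURCE A (Python) =====
-- from typing import Any, Dict, Iterable, List, Optional, Tuple
--
-- _REGIME_LINE_MARKER = "Regime distribution (last 100 cycles):"
--
-- _QUIET_SCALP_BLOCK_MARKER = "QUIET_SCALP_BLOCK "
--
-- _CONFIDENCE_GATE_MARKER = "confidence_gate "
--
-- _PATH_FUNNEL_MARKER = "Path funnel (last 100 cycles):"
--
-- _FREE_CHANNEL_POST_MARKER = "free_channel_post "
--
-- _PRE_TP_FIRE_MARKER = "pre_tp_fire "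
--
-- def count_log_markers(log_text: str) -> Dict[str, int]:
--     """Count occurrences of key periodic log markers in the window.
--
--     Used to surface a "log parse diagnostics" section in the truth report.
--     If e.g. ``path_funnel`` count is 0 but signals were emitted, the issue
--     is log retention or emission cadence — not parser breakage.
--     """
--     if not log_text:
--         return {
--             "path_funnel": 0,
--             "regime_distribution": 0,
--             "quiet_scalp_block": 0,
--             "confidence_gate": 0,
--             "free_channel_post": 0,
--             "pre_tp_fire": 0,
--             "total_lines": 0,
--         }
--     lines = log_text.splitlines()
--     return {
--         "path_funnel": sum(1 for ln in lines if _PATH_FUNNEL_MARKER in ln),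
--         "regime_distribution": sum(1 for ln in lines if _REGIME_LINE_MARKER in ln),
--         "quiet_scalp_block": sum(1 for ln in lines if _QUIET_SCALP_BLOCK_MARKER in ln),
--         "confidence_gate": sum(1 for ln in lines if _CONFIDENCE_GATE_MARKER in ln),
--         "free_channel_post": sum(1 for ln in lines if _FREE_CHANNEL_POST_MARKER in ln),
--         "pre_tp_fire": sum(1 for ln in lines if _PRE_TP_FIRE_MARKER in ln),
--         "total_lines": len(lines),
--     }
-- ===== SOURCE B (Python) =====
-- _REGIME_LINE_MARKER = "Regime distribution (last 100 cycles):"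
-- _QUIET_SCALP_BLOCK_MARKER = "QUIET_SCALP_BLOCK "
-- _CONFIDENCE_GATE_MARKER = "confidence_gate "
-- _PATH_FUNNEL_MARKER = "Path funnel (last 100 cycles):"
-- _FREE_CHANNEL_POST_MARKER = "free_channel_post "
-- _PRE_TP_FIRE_MARKER = "pre_tp_fire "
--
--
-- def count_log_markers(log_text: str):
--     pf = rd = qs = cg = fc = pt = total = 0
--     for ln in log_text.splitlines():
--         total += 1
--         if _PATH_FUNNEL_MARKER in ln:
--             pf += 1
--         if _REGIME_LINE_MARKER in ln:
--             rd += 1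
--         if _QUIET_SCALP_BLOCK_MARKER in ln:
--             qs += 1
--         if _CONFIDENCE_GATE_MARKER in ln:
--             cg += 1
--         if _FREE_CHANNEL_POST_MARKER in ln:
--             fc += 1
--         if _PRE_TP_FIRE_MARKER in ln:
--             pt += 1
--     return {
--         "path_funnel": pf,
--         "regime_distribution": rd,
--         "quiet_scalp_block": qs,
--         "confidence_gate": cg,
--         "free_channel_post": fc,
--         "pre_tp_fire": pt,
--         "total_lines": total,
--     }
-- ===== Notes on version B (the rewrite author's own statement) =====
-- stated objective: alternative
-- what changed: Replaced the empty-string early return plus six independent sum() scans over the line list with a single fused pass that keeps seven integer accumulators and builds the result dict once at the end.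
import Mathlib
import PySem

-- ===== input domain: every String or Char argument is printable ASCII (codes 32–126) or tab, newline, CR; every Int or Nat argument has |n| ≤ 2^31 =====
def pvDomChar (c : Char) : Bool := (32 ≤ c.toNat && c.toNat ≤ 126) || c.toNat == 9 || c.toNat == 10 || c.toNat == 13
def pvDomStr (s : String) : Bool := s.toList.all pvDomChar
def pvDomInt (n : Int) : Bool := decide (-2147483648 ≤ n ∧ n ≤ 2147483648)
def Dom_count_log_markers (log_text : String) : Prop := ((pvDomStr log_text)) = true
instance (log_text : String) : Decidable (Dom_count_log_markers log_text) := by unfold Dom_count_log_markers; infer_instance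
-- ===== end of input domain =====

-- B fuses A's empty-string early return and six independent sum() scans into one pass with seven accumulators (alternative decomposition; return value only).

def pvRegimeMarker : String := "Regime distribution (last 100 cycles):"
def pvQuietMarker : String := "QUIET_SCALP_BLOCK "
def pvConfMarker : String := "confidence_gate "
def pvPathMarker : String := "Path funnel (last 100 cycles):"
def pvFreeMarker : String := "free_channel_post "
def pvPreTpMarker : String := "pre_tp_fire "

-- ===== PORT A =====
-- sum(1 for ln in lines if marker in ln)
def pvSumIf (lines : List String) (marker : String) : Int :=
  lines.foldl (fun acc ln => if PySem.Str.isIn marker ln then acc + 1 else acc) 0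

def count_log_markers (log_text : String) : List (String × Int) :=
  if log_text == "" then
    [("path_funnel", 0), ("regime_distribution", 0), ("quiet_scalp_block", 0),
     ("confidence_gate", 0), ("free_channel_post", 0), ("pre_tp_fire", 0), ("total_lines", 0)]
  else
    let lines := PySem.Str.splitlines log_text
    [("path_funnel", pvSumIf lines pvPathMarker),
     ("regime_distribution", pvSumIf lines pvRegimeMarker),
     ("quiet_scalp_block", pvSumIf lines pvQuietMarker),
     ("confidence_gate", pvSumIf lines pvConfMarker),
     ("free_channel_post", pvSumIf lines pvFreeMarker),
     ("pre_tp_fire", pvSumIf lines pvPreTpMarker),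
     ("total_lines", (lines.length : Int))]

-- ===== PORT B =====
def pvStep (acc : Int × Int × Int × Int × Int × Int × Int) (ln : String) :
    Int × Int × Int × Int × Int × Int × Int :=
  let (pf, rd, qs, cg, fc, pt, total) := acc
  let total := total + 1
  let pf := if PySem.Str.isIn pvPathMarker ln then pf + 1 else pf
  let rd := if PySem.Str.isIn pvRegimeMarker ln then rd + 1 else rd
  let qs := if PySem.Str.isIn pvQuietMarker ln then qs + 1 else qs
  let cg := if PySem.Str.isIn pvConfMarker ln then cg + 1 else cg
  let fc := if PySem.Str.isIn pvFreeMarker ln then fc + 1 else fc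
  let pt := if PySem.Str.isIn pvPreTpMarker ln then pt + 1 else pt
  (pf, rd, qs, cg, fc, pt, total)

def count_log_markers_alt (log_text : String) : List (String × Int) :=
  let r := (PySem.Str.splitlines log_text).foldl pvStep (0, 0, 0, 0, 0, 0, 0)
  [("path_funnel", r.1), ("regime_distribution", r.2.1), ("quiet_scalp_block", r.2.2.1),
   ("confidence_gate", r.2.2.2.1), ("free_channel_post", r.2.2.2.2.1),
   ("pre_tp_fire", r.2.2.2.2.2.1), ("total_lines", r.2.2.2.2.2.2)]

-- ===== PRECONDITION & SPEC =====
def Spec_count_log_markers (log_text : String) (out : List (String × Int)) : Prop := out = count_log_markers_alt log_text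
instance (log_text : String) (out : List (String × Int)) : Decidable (Spec_count_log_markers log_text out) := by unfold Spec_count_log_markers; infer_instance

-- ===== CLAIM (what is proved, stated in full; the proofs are below) =====
def Claim_equal_count_log_markers : Prop := ∀ (log_text : String), Dom_count_log_markers log_text → Spec_count_log_markers log_text (count_log_markers log_text)

-- ===== LEMMAS AND PROOFS =====

theorem pvSumIf_eq_countP (lines : List String) (m : String) :
    pvSumIf lines m = (lines.countP (fun ln => PySem.Str.isIn m ln) : Int) := by
  unfold pvSumIf
  rw [PySem.List.foldl_if_add_one]
  simp only [zero_add]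

theorem pvFoldl_pvStep (lines : List String) (a b c d e f g : Int) :
    lines.foldl pvStep (a, b, c, d, e, f, g) =
      (a + (lines.countP (fun ln => PySem.Str.isIn pvPathMarker ln) : Int),
       b + (lines.countP (fun ln => PySem.Str.isIn pvRegimeMarker ln) : Int),
       c + (lines.countP (fun ln => PySem.Str.isIn pvQuietMarker ln) : Int),
       d + (lines.countP (fun ln => PySem.Str.isIn pvConfMarker ln) : Int),
       e + (lines.countP (fun ln => PySem.Str.isIn pvFreeMarker ln) : Int),
       f + (lines.countP (fun ln => PySem.Str.isIn pvPreTpMarker ln) : Int),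
       g + (lines.length : Int)) := by
  induction lines generalizing a b c d e f g with
  | nil => simp
  | cons hd tl ih =>
    simp only [List.foldl_cons, pvStep]
    rw [ih]
    simp only [List.countP_cons, List.length_cons, Prod.mk.injEq]
    refine ⟨?_, ?_, ?_, ?_, ?_, ?_, ?_⟩ <;> ((try split_ifs) <;> push_cast <;> ring)

theorem count_log_markers_spec : Claim_equal_count_log_markers := by
  intro log_text _
  unfold Spec_count_log_markers count_log_markers count_log_markers_alt
  by_cases h : log_text == ""
  · simp only [h, if_pos]
    have : log_text = "" := by exact String.ext (by simpa using h)
    subst this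
    decide
  · simp only [h, if_neg, Bool.false_eq_true, not_false_iff]
    rw [pvFoldl_pvStep]
    simp [pvSumIf_eq_countP]
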